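/- GENERATED by tools/from_farm_form.py from prooffarm-gif/accepted/digest_file.2/Proof.lean (a worked proof of the farm's unit `digest_file.2`,
   accepted by the verdict) — do not edit. -/
import Gif.Spec.Units.digest_file_2
import Gif.Spec.AllSegs

/-!
  `digest_file.2` (10580BH … 10585AH, 18 instructions, gif_driver.c:153-155): the checked loads of `gif->SColorResolution` (`gif + 8`,
  4 bytes), `gif->SBackGroundColor` (`gif + 12`, 4 bytes) and `gif->AspectByte` (`gif + 16`, one byte, `movzx`), each followed by
  `digest_int(h, it)`. Three blocks of the same shape, one lemma each, from one `digest_file.At` to the next: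

      seg2_blk1   10580BH → 105822H (`ret6`:  the first  `digest_int` has returned)
      seg2_blk2   105822H → 10583CH (`ret8`:  the second `digest_int` has returned)
      seg2_blk3   10583CH → 10585AH (the exit cut: the third `digest_int` has returned, `mov rbx, rax`)

  In each block: the check is "inside the live object `(F.gif, 120)`" (`GifOK.gif_live`, clause G1); `digest_int` wrote 16 bytes of
  stack below the pushed return address; the whole assertion is carried by `digest_file.At.carry` (Gif/Spec/DriverCarry.lean §1).
-/

namespace Gif.Spec.digest_file_2
open X86 X86.User Asan ProgX.Base ProgX.Base.Spec Gif.Spec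

set_option maxRecDepth 4000
set_option maxHeartbeats 4000000

/-- **Block 1** (10580BH … 105822H, gif_driver.c:153): `lea rdi, [r12+8]`, the check of 4 bytes at `gif + 8`
(`SColorResolution`), the load, `digest_int(h, it)`: to its return address `ret6`. -/
theorem seg2_blk1 (Lay : Layout) (hLay : Lay.hi = 0x1000000) (μ : Microarch) (hμ : UserX.MicroOK μ) (u₀ : State)
    (hcode : HasCodeNat Lay u₀ Gif.L.digest_file.entry Gif.Code.code_digest_file.nat Gif.L.digest_file.size)
    (h_int : Calls Lay μ ProgX.Base.WayInv (ProgX.Base.conv u₀) Gif.L.digest_int.entry Gif.Spec.digest_int.spec)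
    (h_load4 : Asan.SmallCheck Lay μ ProgX.Base.WayInv (ProgX.Base.CodeOK u₀) [.rax, .rcx, .rdx] 4
      ProgX.Base.L.__asan_load4_noabort.entry)
    (H : Heap) (rest : List Obj) (frames : List (Nat × FrameLayout)) (F : Forest) (R : Rd) (e : State) (ret : Word) (v : State)
    (hat : digest_file.At Gif.L.digest_file.at_10580b H rest frames F R u₀ e ret v) :
    ReachVia Lay μ WayInv v (digest_file.At Gif.L.digest_file.ret6 H rest frames F R u₀ e ret) := by
  -- the prelude of a segment: the entry, the pre, where `gif` is (numbers) and that it is live (G1)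
  have he := hat.entry
  v_entry he
  obtain ⟨henv, -, hrdi, -, -, -⟩ := hat.pre
  have hbase := henv.heap.base
  have hok := hat.inv.heap
  obtain ⟨hg1, hg2, -⟩ := hat.ok.gif_where hok hbase
  have hlg : LiveIn (H.liveObjs ++ rest) frames F.gif 120 :=
    hat.ok.gif_live.liveIn rest frames (Nat.le_refl _) (Nat.le_refl _)
  -- the present state, in the walker's names
  have w_rip := hat.rip
  have c_rsp : v.reg .rsp = e.reg .rsp - 88 := hat.rsp
  have c_r12 : v.reg .r12 = UInt64.ofNat F.gif := by
    rw [hat.r12]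
    exact Word.eq_ofNat_of_toNat hrdi
  have w_eq : Mem.EqOn ProgX.Base.L.textLo ProgX.Base.L.textHi u₀.mem v.mem := ProgX.Base.conv_code_eqOn hat.code
  have hdf : v.flags .df = false := (show abiInv _ from hat.abi).1
  have hmx : v.mxcsr &&& 0x1F80 = 0x1F80 := (show abiInv _ from hat.abi).2
  have hsse := ProgX.Base.sseOK_of_abiInv hat.abi
  have w_kept : RegsKept [.rsp] v v := RegsKept.refl _ _
  -- 0x10580b, gif_driver.c:153: `h = digest_int(h, gif->SColorResolution)`
  u_walk hcode [hμ.vendor]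
    until [Gif.L.digest_file.ret6]
    span [ProgX.Base.L.textLo, ProgX.Base.L.textHi] side (v_side)
  case check_105810 =>
    -- 0x105810: the check of the load: inside the live object `(F.gif, 120)`
    have hun : ShadowUntouched v.mem s_105810.mem := by v_untouched
    exact hlg.accSmall hat.inv.shadow hun _ 4 (by decide) (by u_omega) (by u_omega)
  case call_inv =>
    v_inv
  case pre_10581d =>
    -- 0x10581d: `digest_int` has no precondition
    trivial
  -- `digest_int` has returned: it wrote 16 bytes of stack below the return address at `[RA − 96, RA − 88)`
  v_after_call w_rsp_10581d w_mem_10581d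
  -- Gif.L.digest_file.ret6: the whole assertion by `digest_file.At.carry`
  have hun : ShadowUntouched v.mem s_10581dr.mem := by v_untouched
  have hsame : Mem.SameExcept [⟨(e.reg .rsp).toNat - 224, (e.reg .rsp).toNat - 64⟩] v.mem s_10581dr.mem := by u_same
  exact ReachVia.done (hat.carry (cut' := Gif.L.digest_file.ret6) w_rip w_rsp (w_kept.get .r12 rfl) w_code w_inv hun hsame)

/-- **Block 2** (105822H … 10583CH, gif_driver.c:154): `mov rbx, rax`, `lea rdi, [r12+0xc]`, the check of 4 bytes at `gif + 12`
(`SBackGroundColor`), the load, `digest_int(h, it)`: to its return address `ret8`. -/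
theorem seg2_blk2 (Lay : Layout) (hLay : Lay.hi = 0x1000000) (μ : Microarch) (hμ : UserX.MicroOK μ) (u₀ : State)
    (hcode : HasCodeNat Lay u₀ Gif.L.digest_file.entry Gif.Code.code_digest_file.nat Gif.L.digest_file.size)
    (h_int : Calls Lay μ ProgX.Base.WayInv (ProgX.Base.conv u₀) Gif.L.digest_int.entry Gif.Spec.digest_int.spec)
    (h_load4 : Asan.SmallCheck Lay μ ProgX.Base.WayInv (ProgX.Base.CodeOK u₀) [.rax, .rcx, .rdx] 4
      ProgX.Base.L.__asan_load4_noabort.entry)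
    (H : Heap) (rest : List Obj) (frames : List (Nat × FrameLayout)) (F : Forest) (R : Rd) (e : State) (ret : Word) (v : State)
    (hat : digest_file.At Gif.L.digest_file.ret6 H rest frames F R u₀ e ret v) :
    ReachVia Lay μ WayInv v (digest_file.At Gif.L.digest_file.ret8 H rest frames F R u₀ e ret) := by
  -- the prelude of a segment: the entry, the pre, where `gif` is (numbers) and that it is live (G1)
  have he := hat.entry
  v_entry he
  obtain ⟨henv, -, hrdi, -, -, -⟩ := hat.pre
  have hbase := henv.heap.base
  have hok := hat.inv.heap
  obtain ⟨hg1, hg2, -⟩ := hat.ok.gif_where hok hbase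
  have hlg : LiveIn (H.liveObjs ++ rest) frames F.gif 120 :=
    hat.ok.gif_live.liveIn rest frames (Nat.le_refl _) (Nat.le_refl _)
  -- the present state, in the walker's names
  have w_rip := hat.rip
  have c_rsp : v.reg .rsp = e.reg .rsp - 88 := hat.rsp
  have c_r12 : v.reg .r12 = UInt64.ofNat F.gif := by
    rw [hat.r12]
    exact Word.eq_ofNat_of_toNat hrdi
  have w_eq : Mem.EqOn ProgX.Base.L.textLo ProgX.Base.L.textHi u₀.mem v.mem := ProgX.Base.conv_code_eqOn hat.code
  have hdf : v.flags .df = false := (show abiInv _ from hat.abi).1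
  have hmx : v.mxcsr &&& 0x1F80 = 0x1F80 := (show abiInv _ from hat.abi).2
  have hsse := ProgX.Base.sseOK_of_abiInv hat.abi
  have w_kept : RegsKept [.rsp] v v := RegsKept.refl _ _
  -- 0x105822, gif_driver.c:154: `h = digest_int(h, gif->SBackGroundColor)`
  u_walk hcode [hμ.vendor]
    until [Gif.L.digest_file.ret8]
    span [ProgX.Base.L.textLo, ProgX.Base.L.textHi] side (v_side)
  case check_10582a =>
    -- 0x10582a: the check of the load: inside the live object `(F.gif, 120)`
    have hun : ShadowUntouched v.mem s_10582a.mem := by v_untouched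
    exact hlg.accSmall hat.inv.shadow hun _ 4 (by decide) (by u_omega) (by u_omega)
  case call_inv =>
    v_inv
  case pre_105837 =>
    -- 0x105837: `digest_int` has no precondition
    trivial
  -- `digest_int` has returned: it wrote 16 bytes of stack below the return address at `[RA − 96, RA − 88)`
  v_after_call w_rsp_105837 w_mem_105837
  -- Gif.L.digest_file.ret8: the whole assertion by `digest_file.At.carry`
  have hun : ShadowUntouched v.mem s_105837r.mem := by v_untouched
  have hsame : Mem.SameExcept [⟨(e.reg .rsp).toNat - 224, (e.reg .rsp).toNat - 64⟩] v.mem s_105837r.mem := by u_same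
  exact ReachVia.done (hat.carry (cut' := Gif.L.digest_file.ret8) w_rip w_rsp (w_kept.get .r12 rfl) w_code w_inv hun hsame)

/-- **Block 3** (10583CH … 10585AH, gif_driver.c:155): `mov rbx, rax`, `lea rdi, [r12+0x10]`, the check of the byte at `gif + 16`
(`AspectByte`), the `movzx` load, `digest_int(h, it)`, `mov rbx, rax`: to the exit cut. -/
theorem seg2_blk3 (Lay : Layout) (hLay : Lay.hi = 0x1000000) (μ : Microarch) (hμ : UserX.MicroOK μ) (u₀ : State)
    (hcode : HasCodeNat Lay u₀ Gif.L.digest_file.entry Gif.Code.code_digest_file.nat Gif.L.digest_file.size)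
    (h_int : Calls Lay μ ProgX.Base.WayInv (ProgX.Base.conv u₀) Gif.L.digest_int.entry Gif.Spec.digest_int.spec)
    (h_load1 : Asan.SmallCheck Lay μ ProgX.Base.WayInv (ProgX.Base.CodeOK u₀) [.rax, .rdx] 1
      ProgX.Base.L.__asan_load1_noabort.entry)
    (H : Heap) (rest : List Obj) (frames : List (Nat × FrameLayout)) (F : Forest) (R : Rd) (e : State) (ret : Word) (v : State)
    (hat : digest_file.At Gif.L.digest_file.ret8 H rest frames F R u₀ e ret v) :
    ReachVia Lay μ WayInv v (digest_file.At Gif.L.digest_file.at_10585a H rest frames F R u₀ e ret) := by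
  -- the prelude of a segment: the entry, the pre, where `gif` is (numbers) and that it is live (G1)
  have he := hat.entry
  v_entry he
  obtain ⟨henv, -, hrdi, -, -, -⟩ := hat.pre
  have hbase := henv.heap.base
  have hok := hat.inv.heap
  obtain ⟨hg1, hg2, -⟩ := hat.ok.gif_where hok hbase
  have hlg : LiveIn (H.liveObjs ++ rest) frames F.gif 120 :=
    hat.ok.gif_live.liveIn rest frames (Nat.le_refl _) (Nat.le_refl _)
  -- the present state, in the walker's names
  have w_rip := hat.rip
  have c_rsp : v.reg .rsp = e.reg .rsp - 88 := hat.rsp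
  have c_r12 : v.reg .r12 = UInt64.ofNat F.gif := by
    rw [hat.r12]
    exact Word.eq_ofNat_of_toNat hrdi
  have w_eq : Mem.EqOn ProgX.Base.L.textLo ProgX.Base.L.textHi u₀.mem v.mem := ProgX.Base.conv_code_eqOn hat.code
  have hdf : v.flags .df = false := (show abiInv _ from hat.abi).1
  have hmx : v.mxcsr &&& 0x1F80 = 0x1F80 := (show abiInv _ from hat.abi).2
  have hsse := ProgX.Base.sseOK_of_abiInv hat.abi
  have w_kept : RegsKept [.rsp] v v := RegsKept.refl _ _
  -- 0x10583c, gif_driver.c:155: `h = digest_int(h, gif->AspectByte)`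
  u_walk hcode [hμ.vendor]
    until [Gif.L.digest_file.at_10585a]
    span [ProgX.Base.L.textLo, ProgX.Base.L.textHi] side (v_side)
  case check_105844 =>
    -- 0x105844: the check of the load: inside the live object `(F.gif, 120)`
    have hun : ShadowUntouched v.mem s_105844.mem := by v_untouched
    exact hlg.accSmall hat.inv.shadow hun _ 1 (by decide) (by u_omega) (by u_omega)
  case call_inv =>
    v_inv
  case pre_105852 =>
    -- 0x105852: `digest_int` has no precondition
    trivial
  -- `digest_int` has returned: it wrote 16 bytes of stack below the return address at `[RA − 96, RA − 88)`
  v_after_call w_rsp_105852 w_mem_105852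
  have hsame1 : Mem.SameExcept [⟨(e.reg .rsp).toNat - 224, (e.reg .rsp).toNat - 64⟩] v.mem s_105852r.mem := by u_same
  have hun1 : ShadowUntouched v.mem s_105852r.mem := by v_untouched
  -- 0x105857: `mov rbx, rax` (`h`), to the exit cut
  u_walk hcode [hμ.vendor]
    until [Gif.L.digest_file.at_10585a]
    span [ProgX.Base.L.textLo, ProgX.Base.L.textHi] side (v_side)
  -- Gif.L.digest_file.at_10585a: the whole assertion by `digest_file.At.carry`
  have hun : ShadowUntouched v.mem s_105857.mem := by
    rw [w_mem]
    exact hun1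
  have hsame : Mem.SameExcept [⟨(e.reg .rsp).toNat - 224, (e.reg .rsp).toNat - 64⟩] v.mem s_105857.mem := by
    rw [w_mem]
    exact hsame1
  have habi : (conv u₀).inv s_105857 := by v_inv
  exact ReachVia.done (hat.carry (cut' := Gif.L.digest_file.at_10585a) w_rip w_rsp (w_kept.get .r12 rfl)
    (ProgX.Base.conv_code_in w_eq) habi hun hsame)

end Gif.Spec.digest_file_2

/-- Segment 2 of `digest_file` (10580BH … 10585AH; gif_driver.c:153-155): the three blocks chained at the return addresses of
`digest_int`. -/
theorem Gif.Spec.Proved.digest_file_2_ok : Gif.Spec.digest_file_2.Statement := by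
  intro Lay hLay μ hμ u₀ hcode h_int h_load4 h_load1 H rest frames F R e ret v hat
  refine (Gif.Spec.digest_file_2.seg2_blk1 Lay hLay μ hμ u₀ hcode h_int h_load4 H rest frames F R e ret v hat).trans ?_
  intro v1 hat1
  refine (Gif.Spec.digest_file_2.seg2_blk2 Lay hLay μ hμ u₀ hcode h_int h_load4 H rest frames F R e ret v1 hat1).trans ?_
  intro v2 hat2
  exact Gif.Spec.digest_file_2.seg2_blk3 Lay hLay μ hμ u₀ hcode h_int h_load1 H rest frames F R e ret v2 hat2
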